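-- pv_equiv track=rewrite | github.com/duressa2022/codeforce | C_Packages.py | min_packages
-- ===== SOURCE A (Python) =====
-- def min_packages(n, k):
--     min_ = n
--     for i in range(1, int(n**0.5) + 1):
--         if n % i == 0:
--             if i <= k:
--                 min_ = min(min_, n // i)
--             if n // i <= k:
--                 min_ = min(min_, i)
--
--     return min_
-- ===== SOURCE B (Python) =====
-- def min_packages(n, k):
--     s = int(n ** 0.5)
--     # phase 1: smallest quotient q <= sqrt(n) whose cofactor is an allowed divisor
--     for q in range(1, s + 1):
--         if n % q == 0 and n // q <= k:
--             return q
--     # phase 2: largest divisor d <= sqrt(n) that is allowed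
--     for d in range(s, 0, -1):
--         if n % d == 0 and d <= k:
--             return n // d
--     return n
-- ===== Notes on version B (the rewrite author's own statement) =====
-- stated objective: alternative
-- what changed: A enumerates every divisor pair i, n//i up to sqrt(n) and folds a running minimum; B instead returns on the first hit of two early-exit scans: the smallest quotient q <= sqrt(n) whose cofactor is an allowed divisor, else the largest allowed divisor d <= sqrt(n) scanned downward.
import Mathlib
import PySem

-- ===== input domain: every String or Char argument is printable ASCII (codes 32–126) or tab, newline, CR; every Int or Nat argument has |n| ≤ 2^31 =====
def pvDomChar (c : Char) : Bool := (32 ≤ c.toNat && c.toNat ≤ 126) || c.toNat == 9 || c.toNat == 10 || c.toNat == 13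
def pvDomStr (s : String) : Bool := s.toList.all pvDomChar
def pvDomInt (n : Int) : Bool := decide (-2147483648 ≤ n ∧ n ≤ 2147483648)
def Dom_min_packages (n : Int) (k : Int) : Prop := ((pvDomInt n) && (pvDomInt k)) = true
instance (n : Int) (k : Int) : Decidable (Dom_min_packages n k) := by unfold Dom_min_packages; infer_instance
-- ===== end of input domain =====

-- B replaces A's full divisor-pair enumeration (min-accumulator over all i ≤ √n) with two
-- early-exit scans: first the smallest quotient q ≤ √n whose cofactor is allowed, else the
-- largest allowed divisor d ≤ √n. Objective: alternative (same O(√n) cost, early exit).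

-- ===== PORT A =====
-- the loop body of A, lifted to a named helper
def aStep (n k : Int) (m : Int) (i : Int) : Int :=
  if PySem.Int.mod n i = 0 then
    let m1 := if i ≤ k then min m (PySem.Int.floordiv n i) else m
    if PySem.Int.floordiv n i ≤ k then min m1 i else m1
  else m

-- int(n**0.5) = ⌊√n⌋ exactly for 0 ≤ n ≤ 2^31 (doubles are exact there); n < 0 is outside Pre_
def min_packages (n : Int) (k : Int) : Int :=
  (PySem.List.pyRange 1 ((Nat.sqrt n.toNat : Int) + 1) 1).foldl (aStep n k) n

-- ===== PORT B =====
-- phase 1 of Source B: first q in the ascending range with n % q == 0 and n // q <= k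
def altFind1 (n k : Int) : List Int → Option Int
  | [] => none
  | q :: rest =>
    if PySem.Int.mod n q = 0 ∧ PySem.Int.floordiv n q ≤ k then some q else altFind1 n k rest

-- phase 2 of Source B: first d in the descending range with n % d == 0 and d <= k, returning n // d
def altFind2 (n k : Int) : List Int → Option Int
  | [] => none
  | d :: rest =>
    if PySem.Int.mod n d = 0 ∧ d ≤ k then some (PySem.Int.floordiv n d) else altFind2 n k rest

def min_packages_alt (n : Int) (k : Int) : Int :=
  match altFind1 n k (PySem.List.pyRange 1 ((Nat.sqrt n.toNat : Int) + 1) 1) with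
  | some q => q
  | none =>
    match altFind2 n k (PySem.List.pyRange (Nat.sqrt n.toNat : Int) 0 (-1)) with
    | some r => r
    | none => n

-- ===== PRECONDITION & SPEC =====
-- Pre_ excludes n < 0, where A raises TypeError (n**0.5 is complex, int() of a complex raises).
def Pre_min_packages (n : Int) (k : Int) : Prop := 0 ≤ n
instance (n : Int) (k : Int) : Decidable (Pre_min_packages n k) := by
  unfold Pre_min_packages; infer_instance

def pvWitness_min_packages : Int × Int := (12, 5)

def Spec_min_packages (n : Int) (k : Int) (out : Int) : Prop := out = min_packages_alt n k
instance (n : Int) (k : Int) (out : Int) : Decidable (Spec_min_packages n k out) := by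
  unfold Spec_min_packages; infer_instance

-- ===== CLAIM (what is proved, stated in full; the proofs are below) =====
def Claim_equal_min_packages : Prop :=
  ∀ (n : Int) (k : Int), Dom_min_packages n k → Pre_min_packages n k →
    Spec_min_packages n k (min_packages n k)

-- ===== LEMMAS AND PROOFS =====

-- d is a divisor of n that A's minimum ranges over
def GoodDiv (n k d : Int) : Prop := 1 ≤ d ∧ d ≤ k ∧ d ∣ n

-- possible values of A's accumulator
def Cand (n k m : Int) : Prop := m = n ∨ ∃ d, GoodDiv n k d ∧ m = n / d

-- ---- integer arithmetic helpers ----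

theorem sqrtInt_lt (n : Int) (hn : 0 ≤ n) :
    n < ((Nat.sqrt n.toNat : Int) + 1) * ((Nat.sqrt n.toNat : Int) + 1) := by
  have h := Nat.lt_succ_sqrt' n.toNat
  have h2 : (n.toNat : Int) < ((Nat.sqrt n.toNat : Int) + 1) * ((Nat.sqrt n.toNat : Int) + 1) := by
    rw [Nat.succ_eq_add_one, pow_two] at h
    exact_mod_cast h
  omega

theorem sqrtInt_le_self (n : Int) (hn : 0 ≤ n) : (Nat.sqrt n.toNat : Int) ≤ n := by
  have h := Nat.sqrt_le_self n.toNat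
  omega

theorem one_le_quot (n d : Int) (hn : 1 ≤ n) (h1 : 1 ≤ d) (hd : d ∣ n) : 1 ≤ n / d := by
  have hm := Int.ediv_mul_cancel hd
  by_contra h
  push_neg at h
  have hle : n / d ≤ 0 := by omega
  have : n / d * d ≤ 0 := mul_nonpos_of_nonpos_of_nonneg hle (by omega)
  omega

theorem quot_dvd (n d : Int) (hd : d ∣ n) : n / d ∣ n := ⟨d, (Int.ediv_mul_cancel hd).symm⟩

theorem quot_quot (n d : Int) (hn : 1 ≤ n) (h1 : 1 ≤ d) (hd : d ∣ n) : n / (n / d) = d := by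
  have hm := Int.ediv_mul_cancel hd
  have hq := one_le_quot n d hn h1 hd
  calc n / (n / d) = (n / d * d) / (n / d) := by rw [hm]
    _ = d := by rw [mul_comm]; exact Int.mul_ediv_cancel d (by omega)

theorem quot_antitone (n d1 d2 : Int) (hn : 0 ≤ n) (h1 : 0 < d1) (h12 : d1 ≤ d2) :
    n / d2 ≤ n / d1 := by
  have h2 : 0 < d2 := lt_of_lt_of_le h1 h12
  have hnn : 0 ≤ n / d2 := Int.ediv_nonneg hn h2.le
  have hle : n / d2 * d2 ≤ n := Int.ediv_mul_le n (by omega)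
  rw [Int.le_ediv_iff_mul_le h1]
  nlinarith

theorem quot_le_self (n d : Int) (hn : 0 ≤ n) (h1 : 1 ≤ d) : n / d ≤ n :=
  Int.ediv_le_self d hn

theorem pair_le_sqrt (n d : Int) (hn : 1 ≤ n) (hd : d ∣ n) (h1 : 1 ≤ d)
    (hgt : (Nat.sqrt n.toNat : Int) < d) : n / d ≤ (Nat.sqrt n.toNat : Int) := by
  by_contra h
  push_neg at h
  have hm := Int.ediv_mul_cancel hd
  have hlt := sqrtInt_lt n (by omega)
  have hmul : ((Nat.sqrt n.toNat : Int) + 1) * ((Nat.sqrt n.toNat : Int) + 1) ≤ n / d * d :=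
    mul_le_mul (by omega) (by omega) (by positivity) (by omega)
  omega

-- ---- generic foldl lemmas ----

theorem foldl_le_init (g : Int → Int → Int) (l : List Int) (a : Int)
    (hg : ∀ m i, i ∈ l → g m i ≤ m) : l.foldl g a ≤ a := by
  induction l generalizing a with
  | nil => simp
  | cons h t ih =>
    have := ih (g a h) (fun m i hi => hg m i (List.mem_cons_of_mem h hi))
    have := hg a h (List.mem_cons_self ..)
    simp only [List.foldl_cons]
    omega

theorem foldl_le_of_mem (g : Int → Int → Int) (l : List Int) (a d c : Int)
    (hg : ∀ m i, i ∈ l → g m i ≤ m) (hd : d ∈ l) (hb : ∀ m, g m d ≤ c) :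
    l.foldl g a ≤ c := by
  induction l generalizing a with
  | nil => simp at hd
  | cons h t ih =>
    simp only [List.foldl_cons]
    rcases List.mem_cons.1 hd with rfl | hdt
    · have h1 : t.foldl g (g a d) ≤ g a d :=
        foldl_le_init g t (g a d) (fun m i hi => hg m i (List.mem_cons_of_mem d hi))
      have := hb a
      omega
    · exact ih (g a h) (fun m i hi => hg m i (List.mem_cons_of_mem h hi)) hdt

theorem foldl_invariant (g : Int → Int → Int) (l : List Int) (a : Int) (Q : Int → Prop)
    (hg : ∀ m i, i ∈ l → Q m → Q (g m i)) (ha : Q a) : Q (l.foldl g a) := by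
  induction l generalizing a with
  | nil => simpa
  | cons h t ih =>
    exact ih (g a h) (fun m i hi => hg m i (List.mem_cons_of_mem h hi))
      (hg a h (List.mem_cons_self ..) ha)

-- ---- aStep lemmas ----

theorem aStep_le (n k m i : Int) : aStep n k m i ≤ m := by
  simp only [aStep]; split_ifs <;> omega

theorem aStep_le_quot (n k m i : Int) (hik : i ≤ k) (hmod : PySem.Int.mod n i = 0) :
    aStep n k m i ≤ PySem.Int.floordiv n i := by
  simp only [aStep]; split_ifs <;> omega

theorem aStep_le_i (n k m i : Int) (hq : PySem.Int.floordiv n i ≤ k)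
    (hmod : PySem.Int.mod n i = 0) : aStep n k m i ≤ i := by
  simp only [aStep]; split_ifs <;> omega

theorem cand_min (n k a b : Int) (ha : Cand n k a) (hb : Cand n k b) : Cand n k (min a b) := by
  rcases min_choice a b with h | h <;> rw [h] <;> assumption

theorem aStep_cand (n k m i : Int) (hn : 1 ≤ n) (hi : 1 ≤ i) (hm : Cand n k m) :
    Cand n k (aStep n k m i) := by
  unfold aStep
  by_cases hdvd : PySem.Int.mod n i = 0
  · have hdv : i ∣ n := (PySem.Int.mod_eq_zero_iff_dvd n i).1 hdvd
    have hfd : PySem.Int.floordiv n i = n / i := PySem.Int.floordiv_eq_ediv_of_pos (by omega)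
    rw [if_pos hdvd]
    have hcq : i ≤ k → Cand n k (n / i) := fun hik => Or.inr ⟨i, ⟨hi, hik, hdv⟩, rfl⟩
    have hci : n / i ≤ k → Cand n k i := by
      intro hqk
      exact Or.inr ⟨n / i, ⟨one_le_quot n i hn hi hdv, hqk, quot_dvd n i hdv⟩,
        (quot_quot n i hn hi hdv).symm⟩
    rw [hfd]
    split_ifs with h1 h2 h3
    · exact cand_min n k _ i (cand_min n k m _ hm (hcq h1)) (hci h2)
    · exact cand_min n k m _ hm (hcq h1)
    · exact cand_min n k m i hm (hci h3)
    · exact hm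
  · rw [if_neg hdvd]; exact hm

-- ---- characterization of A ----

theorem A_le_n (n k : Int) : min_packages n k ≤ n := by
  unfold min_packages
  exact foldl_le_init _ _ _ (fun m i _ => aStep_le n k m i)

theorem A_cand (n k : Int) (hn : 1 ≤ n) : Cand n k (min_packages n k) := by
  unfold min_packages
  refine foldl_invariant _ _ _ _ (fun m i hi hm => ?_) (Or.inl rfl)
  have h := PySem.List.mem_pyRange_one.1 hi
  exact aStep_cand n k m i hn (by omega) hm

theorem A_le_quot (n k d : Int) (hn : 1 ≤ n) (hgd : GoodDiv n k d) :
    min_packages n k ≤ n / d := by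
  obtain ⟨h1, hk, hd⟩ := hgd
  unfold min_packages
  by_cases hds : d ≤ (Nat.sqrt n.toNat : Int)
  · have hmem : d ∈ PySem.List.pyRange 1 ((Nat.sqrt n.toNat : Int) + 1) 1 :=
      PySem.List.mem_pyRange_one.2 ⟨h1, by omega⟩
    have h := foldl_le_of_mem (aStep n k) _ n d (PySem.Int.floordiv n d)
      (fun m i _ => aStep_le n k m i) hmem
      (fun m => aStep_le_quot n k m d hk ((PySem.Int.mod_eq_zero_iff_dvd n d).2 hd))
    rwa [PySem.Int.floordiv_eq_ediv_of_pos (by omega : (0:Int) < d)] at h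
  · push_neg at hds
    have hq1 : 1 ≤ n / d := one_le_quot n d hn h1 hd
    have hqs : n / d ≤ (Nat.sqrt n.toNat : Int) := pair_le_sqrt n d hn hd h1 hds
    have hmem : n / d ∈ PySem.List.pyRange 1 ((Nat.sqrt n.toNat : Int) + 1) 1 :=
      PySem.List.mem_pyRange_one.2 ⟨hq1, by omega⟩
    have hcond : PySem.Int.floordiv n (n / d) ≤ k := by
      rw [PySem.Int.floordiv_eq_ediv_of_pos (by omega : (0:Int) < n / d),
        quot_quot n d hn h1 hd]
      exact hk
    have hmod : PySem.Int.mod n (n / d) = 0 :=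
      (PySem.Int.mod_eq_zero_iff_dvd n (n / d)).2 (quot_dvd n d hd)
    exact foldl_le_of_mem (aStep n k) _ n (n / d) (n / d)
      (fun m i _ => aStep_le n k m i) hmem (fun m => aStep_le_i n k m (n / d) hcond hmod)

-- ---- find lemmas for B ----

theorem find1_none (n k : Int) (l : List Int) :
    altFind1 n k l = none ↔
      ∀ q ∈ l, ¬(PySem.Int.mod n q = 0 ∧ PySem.Int.floordiv n q ≤ k) := by
  induction l with
  | nil => simp [altFind1]
  | cons h t ih =>
    unfold altFind1
    split_ifs with hc
    · simp only [reduceCtorEq, false_iff]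
      intro hall
      exact hall h (List.mem_cons_self ..) hc
    · rw [ih]
      constructor
      · intro hall y hy
        rcases List.mem_cons.1 hy with rfl | hyt
        · exact hc
        · exact hall y hyt
      · intro hall y hy
        exact hall y (List.mem_cons_of_mem h hy)

theorem find1_some (n k q : Int) (l : List Int) (h : altFind1 n k l = some q) :
    q ∈ l ∧ PySem.Int.mod n q = 0 ∧ PySem.Int.floordiv n q ≤ k := by
  induction l with
  | nil => simp [altFind1] at h
  | cons a t ih =>
    unfold altFind1 at h
    split_ifs at h with hc
    · obtain rfl : a = q := by injection h
      exact ⟨List.mem_cons_self .., hc⟩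
    · obtain ⟨hm, hc2⟩ := ih h
      exact ⟨List.mem_cons_of_mem a hm, hc2⟩

theorem find1_first (n k q : Int) (l : List Int) (hl : l.Pairwise (· < ·))
    (h : altFind1 n k l = some q) :
    ∀ y ∈ l, (PySem.Int.mod n y = 0 ∧ PySem.Int.floordiv n y ≤ k) → q ≤ y := by
  induction l with
  | nil => simp [altFind1] at h
  | cons a t ih =>
    rw [List.pairwise_cons] at hl
    unfold altFind1 at h
    split_ifs at h with hc
    · obtain rfl : a = q := by injection h
      intro y hy _
      rcases List.mem_cons.1 hy with rfl | hyt
      · exact le_refl _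
      · exact (hl.1 y hyt).le
    · intro y hy hcy
      rcases List.mem_cons.1 hy with rfl | hyt
      · exact absurd hcy hc
      · exact ih hl.2 h y hyt hcy

theorem find2_none (n k : Int) (l : List Int) :
    altFind2 n k l = none ↔ ∀ d ∈ l, ¬(PySem.Int.mod n d = 0 ∧ d ≤ k) := by
  induction l with
  | nil => simp [altFind2]
  | cons h t ih =>
    unfold altFind2
    split_ifs with hc
    · simp only [reduceCtorEq, false_iff]
      intro hall
      exact hall h (List.mem_cons_self ..) hc
    · rw [ih]
      constructor
      · intro hall y hy
        rcases List.mem_cons.1 hy with rfl | hyt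
        · exact hc
        · exact hall y hyt
      · intro hall y hy
        exact hall y (List.mem_cons_of_mem h hy)

theorem find2_first (n k r : Int) (l : List Int) (hl : l.Pairwise (· > ·))
    (h : altFind2 n k l = some r) :
    ∃ d ∈ l, (PySem.Int.mod n d = 0 ∧ d ≤ k) ∧ r = PySem.Int.floordiv n d ∧
      ∀ y ∈ l, (PySem.Int.mod n y = 0 ∧ y ≤ k) → y ≤ d := by
  induction l with
  | nil => simp [altFind2] at h
  | cons a t ih =>
    rw [List.pairwise_cons] at hl
    unfold altFind2 at h
    split_ifs at h with hc
    · obtain rfl : PySem.Int.floordiv n a = r := by injection h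
      refine ⟨a, List.mem_cons_self .., hc, rfl, ?_⟩
      intro y hy _
      rcases List.mem_cons.1 hy with rfl | hyt
      · exact le_refl y
      · exact (hl.1 y hyt).le
    · obtain ⟨d, hdm, hcd, hr, hmax⟩ := ih hl.2 h
      refine ⟨d, List.mem_cons_of_mem a hdm, hcd, hr, ?_⟩
      intro y hy hcy
      rcases List.mem_cons.1 hy with rfl | hyt
      · exact absurd hcy hc
      · exact hmax y hyt hcy

theorem desc_pairwise (s : Int) :
    (PySem.List.pyRange s 0 (-1)).Pairwise (· > ·) := by
  rw [PySem.List.pyRange_neg_one_eq_reverse, List.pairwise_reverse]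
  exact PySem.List.pairwise_lt_pyRange_one (0 + 1) (s + 1)

-- ---- characterization of B ----

theorem B_le_n (n k : Int) (hn : 1 ≤ n) : min_packages_alt n k ≤ n := by
  unfold min_packages_alt
  cases hf1 : altFind1 n k (PySem.List.pyRange 1 ((Nat.sqrt n.toNat : Int) + 1) 1) with
  | some q =>
    have hmem := (find1_some n k q _ hf1).1
    have h := PySem.List.mem_pyRange_one.1 hmem
    have := sqrtInt_le_self n (by omega)
    show q ≤ n
    omega
  | none =>
    cases hf2 : altFind2 n k (PySem.List.pyRange (Nat.sqrt n.toNat : Int) 0 (-1)) with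
    | some r =>
      obtain ⟨d, hdm, ⟨hmod, hk⟩, hr, _⟩ := find2_first n k r _ (desc_pairwise _) hf2
      have hd := PySem.List.mem_pyRange_neg_one.1 hdm
      have hdv : d ∣ n := (PySem.Int.mod_eq_zero_iff_dvd n d).1 hmod
      have hrd : r = n / d := by
        rw [hr, PySem.Int.floordiv_eq_ediv_of_pos (by omega : (0:Int) < d)]
      show r ≤ n
      rw [hrd]
      exact quot_le_self n d (by omega) (by omega)
    | none => simp

theorem B_le_quot (n k d : Int) (hn : 1 ≤ n) (hgd : GoodDiv n k d) :
    min_packages_alt n k ≤ n / d := by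
  obtain ⟨h1, hk, hd⟩ := hgd
  have hq1 : 1 ≤ n / d := one_le_quot n d hn h1 hd
  have hmodq : PySem.Int.mod n (n / d) = 0 :=
    (PySem.Int.mod_eq_zero_iff_dvd n (n / d)).2 (quot_dvd n d hd)
  have hflq : PySem.Int.floordiv n (n / d) ≤ k := by
    rw [PySem.Int.floordiv_eq_ediv_of_pos (by omega : (0:Int) < n / d), quot_quot n d hn h1 hd]
    exact hk
  unfold min_packages_alt
  cases hf1 : altFind1 n k (PySem.List.pyRange 1 ((Nat.sqrt n.toNat : Int) + 1) 1) with
  | some q =>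
    show q ≤ n / d
    by_cases hqs : n / d ≤ (Nat.sqrt n.toNat : Int)
    · have hmem : n / d ∈ PySem.List.pyRange 1 ((Nat.sqrt n.toNat : Int) + 1) 1 :=
        PySem.List.mem_pyRange_one.2 ⟨hq1, by omega⟩
      exact find1_first n k q _ (PySem.List.pairwise_lt_pyRange_one _ _) hf1 (n / d) hmem
        ⟨hmodq, hflq⟩
    · have hmem := (find1_some n k q _ hf1).1
      have h := PySem.List.mem_pyRange_one.1 hmem
      omega
  | none =>
    cases hf2 : altFind2 n k (PySem.List.pyRange (Nat.sqrt n.toNat : Int) 0 (-1)) with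
    | some r =>
      obtain ⟨d2, hdm, ⟨hmod2, hk2⟩, hr, hmax⟩ := find2_first n k r _ (desc_pairwise _) hf2
      have hd2 := PySem.List.mem_pyRange_neg_one.1 hdm
      by_cases hds : d ≤ (Nat.sqrt n.toNat : Int)
      · have hdmem : d ∈ PySem.List.pyRange (Nat.sqrt n.toNat : Int) 0 (-1) :=
          PySem.List.mem_pyRange_neg_one.2 ⟨by omega, hds⟩
        have hdd2 : d ≤ d2 := hmax d hdmem ⟨(PySem.Int.mod_eq_zero_iff_dvd n d).2 hd, hk⟩
        show r ≤ n / d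
        rw [hr, PySem.Int.floordiv_eq_ediv_of_pos (by omega : (0:Int) < d2)]
        exact quot_antitone n d d2 (by omega) (by omega) hdd2
      · exfalso
        have hqs : n / d ≤ (Nat.sqrt n.toNat : Int) :=
          pair_le_sqrt n d hn hd h1 (by omega)
        have hmem : n / d ∈ PySem.List.pyRange 1 ((Nat.sqrt n.toNat : Int) + 1) 1 :=
          PySem.List.mem_pyRange_one.2 ⟨hq1, by omega⟩
        exact (find1_none n k _).1 hf1 (n / d) hmem ⟨hmodq, hflq⟩
    | none =>
      exfalso
      by_cases hds : d ≤ (Nat.sqrt n.toNat : Int)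
      · have hdmem : d ∈ PySem.List.pyRange (Nat.sqrt n.toNat : Int) 0 (-1) :=
          PySem.List.mem_pyRange_neg_one.2 ⟨by omega, hds⟩
        exact (find2_none n k _).1 hf2 d hdmem ⟨(PySem.Int.mod_eq_zero_iff_dvd n d).2 hd, hk⟩
      · have hqs : n / d ≤ (Nat.sqrt n.toNat : Int) :=
          pair_le_sqrt n d hn hd h1 (by omega)
        have hmem : n / d ∈ PySem.List.pyRange 1 ((Nat.sqrt n.toNat : Int) + 1) 1 :=
          PySem.List.mem_pyRange_one.2 ⟨hq1, by omega⟩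
        exact (find1_none n k _).1 hf1 (n / d) hmem ⟨hmodq, hflq⟩

theorem B_cand (n k : Int) (hn : 1 ≤ n) : Cand n k (min_packages_alt n k) := by
  unfold min_packages_alt
  cases hf1 : altFind1 n k (PySem.List.pyRange 1 ((Nat.sqrt n.toNat : Int) + 1) 1) with
  | some q =>
    obtain ⟨hmem, hmod, hfl⟩ := find1_some n k q _ hf1
    have h := PySem.List.mem_pyRange_one.1 hmem
    have hq1 : (1:Int) ≤ q := h.1
    have hdv : q ∣ n := (PySem.Int.mod_eq_zero_iff_dvd n q).1 hmod
    rw [PySem.Int.floordiv_eq_ediv_of_pos (by omega : (0:Int) < q)] at hfl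
    show Cand n k q
    exact Or.inr ⟨n / q, ⟨one_le_quot n q hn hq1 hdv, hfl, quot_dvd n q hdv⟩,
      (quot_quot n q hn hq1 hdv).symm⟩
  | none =>
    cases hf2 : altFind2 n k (PySem.List.pyRange (Nat.sqrt n.toNat : Int) 0 (-1)) with
    | some r =>
      obtain ⟨d, hdm, ⟨hmod, hk⟩, hr, _⟩ := find2_first n k r _ (desc_pairwise _) hf2
      have hd := PySem.List.mem_pyRange_neg_one.1 hdm
      have hdv : d ∣ n := (PySem.Int.mod_eq_zero_iff_dvd n d).1 hmod
      have hrd : r = n / d := by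
        rw [hr, PySem.Int.floordiv_eq_ediv_of_pos (by omega : (0:Int) < d)]
      show Cand n k r
      exact Or.inr ⟨d, ⟨by omega, hk, hdv⟩, hrd⟩
    | none => exact Or.inl rfl

-- ---- main equivalence ----

theorem main_eq (n k : Int) (hn : 0 ≤ n) : min_packages n k = min_packages_alt n k := by
  rcases lt_or_ge n 1 with hlt | hge
  · have h0 : n = 0 := by omega
    subst h0
    simp [min_packages, min_packages_alt, altFind1, altFind2,
      PySem.List.pyRange_one_eq_nil (by norm_num : (1:Int) ≤ 1),
      PySem.List.pyRange_neg_one_eq_nil (by norm_num : (0:Int) ≤ 0)]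
  · apply le_antisymm
    · rcases B_cand n k hge with hB | ⟨d, hgd, hB⟩
      · rw [hB]; exact A_le_n n k
      · rw [hB]; exact A_le_quot n k d hge hgd
    · rcases A_cand n k hge with hA | ⟨d, hgd, hA⟩
      · rw [hA]; exact B_le_n n k hge
      · rw [hA]; exact B_le_quot n k d hge hgd

-- ===== VERDICT (by name: the statement is the Claim_ definition above) =====
theorem min_packages_spec : Claim_equal_min_packages := by
  intro n k _ hpre
  unfold Spec_min_packages
  exact main_eq n k hpre
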